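-- pv_equiv track=rewrite | github.com/abhisheksingh75/DataStructure_Algorithm | Desktop/Acadmey/git_repos/DataStructures/Dynamic_Programming/count_no_of_wows.py | solve
-- ===== SOURCE A (Python) =====
-- def solve(A, B):
--
--     DP = [[0 for i in range(len(A)+1)] for j in range(len(B)+1)]
--
--     for i in range(len(A)+1):
--         DP[0][i] = 1
--     A =  " "+A
--     B = " "+B
--     for i in range(1,len(B)):
--         for j in range(1, len(A)):
--             if A[j] == B[i]:
--                 DP[i][j] = DP[i-1][j-1] + DP[i][j-1]
--             elif A[j] != B[i] and B[i] == 'w' and A[j] == 'v' and j-1 >0 and A[j-1] == 'v':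
--                 DP[i][j] = DP[i-1][j-2] + DP[i][j-1]
--             else:
--                 DP[i][j] = DP[i][j-1]
--     return DP[len(B)-1][len(A)-1]
-- ===== SOURCE B (Python) =====
-- def solve(A, B):
--     # Top-down memoized evaluation of only the cells the answer needs,
--     # driven by an explicit work stack (no recursion, no dense table).
--     m, n = len(B), len(A)
--
--     def deps(i, j):  # dependencies of cell (i, j), 1-indexed, i >= 1, j >= 1
--         if A[j - 1] == B[i - 1]:
--             return [(i - 1, j - 1), (i, j - 1)]
--         if B[i - 1] == 'w' and A[j - 1] == 'v' and j >= 2 and A[j - 2] == 'v':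
--             return [(i - 1, j - 2), (i, j - 1)]
--         return [(i, j - 1)]
--
--     memo = {}
--     stack = [((m, n), False)]
--     while stack:
--         (i, j), expanded = stack.pop()
--         if expanded:
--             memo[(i, j)] = sum(memo[d] for d in deps(i, j))
--         elif (i, j) in memo:
--             pass
--         elif i == 0:
--             memo[(i, j)] = 1
--         elif j == 0:
--             memo[(i, j)] = 0
--         else:
--             stack.append(((i, j), True))
--             stack.extend((d, False) for d in deps(i, j) if d not in memo)
--     return memo[(m, n)]
-- ===== Notes on version B (the rewrite author's own statement) =====
-- stated objective: alternative
-- what changed: B replaces A's dense bottom-up (len(B)+1)x(len(A)+1) table filled by two nested loops with a top-down memoized evaluation driven by an explicit work stack and a dict cache: only the cells the answer actually depends on are ever computed.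
import Mathlib
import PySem

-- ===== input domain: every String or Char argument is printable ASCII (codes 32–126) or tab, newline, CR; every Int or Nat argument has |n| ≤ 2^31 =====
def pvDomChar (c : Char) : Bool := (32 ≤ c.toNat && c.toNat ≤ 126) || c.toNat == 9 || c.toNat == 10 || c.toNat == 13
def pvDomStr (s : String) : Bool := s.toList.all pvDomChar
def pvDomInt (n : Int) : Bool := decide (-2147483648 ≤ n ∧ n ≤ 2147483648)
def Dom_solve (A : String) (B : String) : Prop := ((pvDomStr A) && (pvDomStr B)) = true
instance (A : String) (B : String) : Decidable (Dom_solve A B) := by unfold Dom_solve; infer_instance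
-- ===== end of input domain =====

-- B replaces A's dense bottom-up (len(B)+1)×(len(A)+1) table fill with a top-down
-- memoized evaluation driven by an explicit work stack: only the cells the answer
-- depends on are ever computed, stored in a dict (objective: alternative).

-- ===== PORT A =====
-- 2-D table lookup DP[i][j] (indices always in range in A's loops)
def pvGet2 (DP : List (List Int)) (i j : Nat) : Int := (DP.getD i []).getD j 0
-- 2-D table assignment DP[i][j] = v
def pvSet2 (DP : List (List Int)) (i j : Nat) (v : Int) : List (List Int) :=
  DP.modify i (fun r => r.set j v)

def solve (A : String) (B : String) : Int :=
  let a0 := A.toList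
  let b0 := B.toList
  -- DP = [[0]*(len(A)+1) for _ in range(len(B)+1)]
  let DP0 : List (List Int) := List.replicate (b0.length+1) (List.replicate (a0.length+1) 0)
  -- for i in range(len(A)+1): DP[0][i] = 1
  let DP1 := (List.range (a0.length+1)).foldl (fun DP i => pvSet2 DP 0 i 1) DP0
  -- A = " "+A ; B = " "+B
  let a := ' ' :: a0
  let b := ' ' :: b0
  -- for i in range(1,len(B)): for j in range(1,len(A)): …
  let DP2 := (List.range' 1 (b.length-1)).foldl (fun DP i =>
    (List.range' 1 (a.length-1)).foldl (fun DP j =>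
      if a.getD j ' ' = b.getD i ' ' then
        pvSet2 DP i j (pvGet2 DP (i-1) (j-1) + pvGet2 DP i (j-1))
      else if a.getD j ' ' ≠ b.getD i ' ' ∧ b.getD i ' ' = 'w' ∧ a.getD j ' ' = 'v' ∧
              j - 1 > 0 ∧ a.getD (j-1) ' ' = 'v' then
        pvSet2 DP i j (pvGet2 DP (i-1) (j-2) + pvGet2 DP i (j-1))
      else
        pvSet2 DP i j (pvGet2 DP i (j-1))) DP) DP1
  pvGet2 DP2 (b.length-1) (a.length-1)

-- ===== PORT B =====
-- deps(i, j) of Source B: the cells cell (i, j) depends on (1-indexed; only called with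
-- 1 ≤ i ≤ len(B), 1 ≤ j ≤ len(A), so every string index below is in range and
-- getD is exact for Python's A[j-1] / B[i-1] / A[j-2])
def depsB (a b : List Char) (i j : Nat) : List (Nat × Nat) :=
  if a.getD (j-1) ' ' = b.getD (i-1) ' ' then [(i-1, j-1), (i, j-1)]
  else if b.getD (i-1) ' ' = 'w' ∧ a.getD (j-1) ' ' = 'v' ∧ 2 ≤ j ∧ a.getD (j-2) ' ' = 'v' then
    [(i-1, j-2), (i, j-1)]
  else [(i, j-1)]

-- weight of a stack entry / of the stack, used only as the termination measure of the loop
def wEntry (e : (Nat × Nat) × Bool) : Nat := if e.2 then 1 else 4 ^ (e.1.2 + 1)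
def phiStack (s : List ((Nat × Nat) × Bool)) : Nat := (s.map wEntry).sum

lemma depsB_snd_lt (a b : List Char) (i j : Nat) (_hj : ¬ j = 0) :
    ∀ d ∈ depsB a b i j, d.2 + 1 ≤ j := by
  unfold depsB
  split_ifs <;> intro d hd <;> simp only [List.mem_cons] at hd <;>
    rcases hd with h | h | h <;> simp_all <;> omega

lemma one_le_wEntry (e : (Nat × Nat) × Bool) : 1 ≤ wEntry e := by
  unfold wEntry
  split
  · exact le_refl 1
  · exact Nat.one_le_pow _ _ (by norm_num)

lemma phiStack_expand_lt (pend : List (Nat × Nat)) (i j : Nat) (rest : List ((Nat × Nat) × Bool))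
    (_hj : ¬ j = 0) (hlen : pend.length ≤ 2) (hcol : ∀ d ∈ pend, d.2 + 1 ≤ j) :
    phiStack (pend.reverse.map (fun d => (d, false)) ++ ((i, j), true) :: rest)
      < phiStack (((i, j), false) :: rest) := by
  unfold phiStack
  rw [List.map_append, List.sum_append, List.map_cons, List.map_cons, List.sum_cons, List.sum_cons]
  have h1 : ((pend.reverse.map (fun d => (d, false))).map wEntry).sum ≤ 2 * 4 ^ j := by
    have hb : ∀ x ∈ (pend.reverse.map (fun d => (d, false))).map wEntry, x ≤ 4 ^ j := by
      intro x hx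
      simp only [List.mem_map, List.mem_reverse] at hx
      obtain ⟨d, hd, rfl⟩ := hx
      obtain ⟨d, hd, rfl⟩ := hd
      simp only [wEntry]
      exact Nat.pow_le_pow_right (by norm_num) (hcol d hd)
    calc ((pend.reverse.map (fun d => (d, false))).map wEntry).sum
        ≤ ((pend.reverse.map (fun d => (d, false))).map wEntry).length * 4 ^ j :=
          List.sum_le_card_nsmul _ _ hb
      _ ≤ 2 * 4 ^ j := by
          apply Nat.mul_le_mul_right
          simpa using hlen
  have h2 : (1 : Nat) ≤ 4 ^ j := Nat.one_le_pow _ _ (by norm_num)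
  have h3 : wEntry ((i, j), true) = 1 := rfl
  have h4 : wEntry ((i, j), false) = 4 ^ (j + 1) := rfl
  rw [h3, h4, pow_succ]
  omega

lemma depsB_length_le (a b : List Char) (i j : Nat) : (depsB a b i j).length ≤ 2 := by
  unfold depsB; split_ifs <;> simp

-- the main loop of Source B: pop an entry; an unexpanded entry is memoized directly
-- (cache hit / base case) or re-pushed expanded under its not-yet-memoized
-- dependencies; an expanded entry is memoized from its dependencies' values.
-- Python reads memo[d] there (never a KeyError: every dependency is memoized by
-- then, proved below); getD … 0 is the total form of that lookup.
def loopB (a b : List Char) (stack : List ((Nat × Nat) × Bool))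
    (memo : PySem.Dict (Nat × Nat) Int) : PySem.Dict (Nat × Nat) Int :=
  match stack with
  | [] => memo
  | ((i, j), true) :: rest =>
    loopB a b rest (memo.insert (i, j) (((depsB a b i j).map (fun d => memo.getD d 0)).sum))
  | ((i, j), false) :: rest =>
    if (memo.get? (i, j)).isSome then
      loopB a b rest memo
    else if i = 0 then
      loopB a b rest (memo.insert (i, j) 1)
    else if j = 0 then
      loopB a b rest (memo.insert (i, j) 0)
    else
      loopB a b
        ((((depsB a b i j).filter (fun d => (memo.get? d).isNone)).reverse.map
            (fun d => (d, false))) ++ ((i, j), true) :: rest) memo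
  termination_by phiStack stack
  decreasing_by
  · simp only [phiStack, List.map_cons, List.sum_cons]
    have := one_le_wEntry ((i, j), true)
    omega
  · simp only [phiStack, List.map_cons, List.sum_cons]
    have := one_le_wEntry ((i, j), false)
    omega
  · simp only [phiStack, List.map_cons, List.sum_cons]
    have := one_le_wEntry ((i, j), false)
    omega
  · simp only [phiStack, List.map_cons, List.sum_cons]
    have := one_le_wEntry ((i, j), false)
    omega
  · rename_i _hobs _hi0 hj0
    exact phiStack_expand_lt _ i j rest hj0
      (le_trans (List.length_filter_le _ _) (depsB_length_le a b i j))
      (fun d hd => depsB_snd_lt a b i j hj0 d (List.mem_of_mem_filter hd))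

def solve_alt (A : String) (B : String) : Int :=
  let a := A.toList
  let b := B.toList
  -- memo = {}; stack = [((len(B), len(A)), False)]; while stack: …; return memo[(m, n)]
  -- (the final lookup never raises — proved below — so getD … 0 is its total form)
  (loopB a b [((b.length, a.length), false)] PySem.Dict.empty).getD (b.length, a.length) 0

-- ===== PRECONDITION & SPEC =====
def Spec_solve (A : String) (B : String) (out : Int) : Prop := out = solve_alt A B
instance (A : String) (B : String) (out : Int) : Decidable (Spec_solve A B out) := by unfold Spec_solve; infer_instance

-- ===== CLAIM (what is proved, stated in full; the proofs are below) =====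
def Claim_equal_solve : Prop := ∀ (A : String) (B : String), Dom_solve A B → Spec_solve A B (solve A B)

-- ===== LEMMAS AND PROOFS =====

-- the common recurrence: dp i j = number of matchings of B[0..i) into A[0..j) under the v/w rule
def dp (a b : List Char) : Nat → Nat → Int
  | 0, _ => 1
  | _+1, 0 => 0
  | i+1, j+1 =>
    if a.getD j ' ' = b.getD i ' ' then dp a b i j + dp a b (i+1) j
    else if b.getD i ' ' = 'w' ∧ a.getD j ' ' = 'v' ∧ 1 ≤ j ∧ a.getD (j-1) ' ' = 'v' then
      dp a b i (j-1) + dp a b (i+1) j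
    else dp a b (i+1) j
  termination_by _ j => j
  decreasing_by all_goals omega

-- ---- dp base facts ----
lemma dp_row0 (a0 b0 : List Char) (j : Nat) : dp a0 b0 0 j = 1 := by
  cases j <;> simp [dp]

lemma dp_col0 (a0 b0 : List Char) (i : Nat) (hi : 1 ≤ i) : dp a0 b0 i 0 = 0 := by
  cases i with
  | zero => omega
  | succ ip => simp [dp]

-- dp's recurrence written through depsB (the shape B computes with)
lemma dp_succ (a b : List Char) (i j : Nat) (hi : 1 ≤ i) (hj : 1 ≤ j) :
    dp a b i j = ((depsB a b i j).map (fun d => dp a b d.1 d.2)).sum := by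
  obtain ⟨i', rfl⟩ : ∃ i', i = i' + 1 := ⟨i - 1, by omega⟩
  obtain ⟨j', rfl⟩ : ∃ j', j = j' + 1 := ⟨j - 1, by omega⟩
  rw [dp, depsB]
  have h2 : (2 ≤ j' + 1) ↔ (1 ≤ j') := by omega
  simp only [Nat.succ_sub_one, show j' + 1 - 2 = j' - 1 from by omega]
  split_ifs <;> first | (exfalso; tauto) | simp

-- ================== A-side: the row-by-row table fill computes dp ==================

-- A's loop body, named for the proofs (identical to the lambda in `solve`)
def aBody (a b : List Char) (i : Nat) (DP : List (List Int)) (j : Nat) : List (List Int) :=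
  if a.getD j ' ' = b.getD i ' ' then
    pvSet2 DP i j (pvGet2 DP (i-1) (j-1) + pvGet2 DP i (j-1))
  else if a.getD j ' ' ≠ b.getD i ' ' ∧ b.getD i ' ' = 'w' ∧ a.getD j ' ' = 'v' ∧
          j - 1 > 0 ∧ a.getD (j-1) ' ' = 'v' then
    pvSet2 DP i j (pvGet2 DP (i-1) (j-2) + pvGet2 DP i (j-1))
  else
    pvSet2 DP i j (pvGet2 DP i (j-1))

def initFold (m n k : Nat) : List (List Int) :=
  (List.range k).foldl (fun T i => pvSet2 T 0 i 1) (List.replicate (m+1) (List.replicate (n+1) 0))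

def aRow (a0 b0 : List Char) (i : Nat) (T : List (List Int)) (c : Nat) : List (List Int) :=
  (List.range' 1 c).foldl (aBody (' '::a0) (' '::b0) i) T

def aRows (a0 b0 : List Char) (k : Nat) : List (List Int) :=
  (List.range' 1 k).foldl (fun DP i => aRow a0 b0 i DP a0.length)
    (initFold b0.length a0.length (a0.length+1))

lemma solve_eq (A B : String) :
    solve A B = pvGet2 (aRows A.toList B.toList B.toList.length) B.toList.length A.toList.length := by
  simp only [solve, aRows, aRow, initFold, List.length_cons, Nat.add_sub_cancel]
  rfl

-- ---- 2-D table access lemmas ----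
lemma length_set2 (T : List (List Int)) (i j : Nat) (v : Int) :
    (pvSet2 T i j v).length = T.length := by simp [pvSet2]

lemma rowlen_set2 (T : List (List Int)) (i j : Nat) (v : Int) (i' : Nat) :
    ((pvSet2 T i j v).getD i' []).length = ((T.getD i' []).length) := by
  simp only [pvSet2, List.getD_eq_getElem?_getD, List.getElem?_modify]
  cases h : T[i']? with
  | none => simp
  | some r => simp only [Option.getD_some]; split <;> simp

lemma get2_set2_ne (T : List (List Int)) (i j : Nat) (v : Int) (i' j' : Nat)
    (h : i' ≠ i ∨ j' ≠ j) : pvGet2 (pvSet2 T i j v) i' j' = pvGet2 T i' j' := by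
  simp only [pvGet2, pvSet2, List.getD_eq_getElem?_getD, List.getElem?_modify]
  cases hT : T[i']? with
  | none => simp
  | some r =>
    simp only [Option.getD_some]
    split
    · rename_i hij
      have hj : j ≠ j' := by tauto
      simp [List.getElem?_set_ne hj]
    · rfl

lemma get2_set2_self (T : List (List Int)) (i j : Nat) (v : Int)
    (hi : i < T.length) (hj : j < (T.getD i []).length) :
    pvGet2 (pvSet2 T i j v) i j = v := by
  obtain ⟨r, hr⟩ : ∃ r, T[i]? = some r := ⟨T[i], List.getElem?_eq_getElem hi⟩
  have hjr : j < r.length := by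
    rw [List.getD_eq_getElem?_getD, hr] at hj; simpa using hj
  simp [pvGet2, pvSet2, List.getD_eq_getElem?_getD, hr, List.getElem?_set_self hjr]

lemma replicate_rowlen (m n i : Nat) (hi : i ≤ m) :
    ((List.replicate (m+1) (List.replicate (n+1) (0:Int))).getD i []).length = n+1 := by
  rw [List.getD_eq_getElem?_getD, List.getElem?_replicate]
  simp [Nat.lt_succ_of_le hi]

lemma replicate_get0 (m n i j : Nat) :
    pvGet2 (List.replicate (m+1) (List.replicate (n+1) (0:Int))) i j = 0 := by
  unfold pvGet2
  simp only [List.getD_eq_getElem?_getD, List.getElem?_replicate]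
  split <;> simp [List.getElem?_replicate] <;> split <;> simp

lemma initFold_spec (m n : Nat) : ∀ k, k ≤ n+1 →
    (initFold m n k).length = m+1 ∧
    (∀ i', ((initFold m n k).getD i' []).length = ((List.replicate (m+1) (List.replicate (n+1) (0:Int))).getD i' []).length) ∧
    (∀ j, j < k → pvGet2 (initFold m n k) 0 j = 1) ∧
    (∀ j, k ≤ j → pvGet2 (initFold m n k) 0 j = 0) ∧
    (∀ i j, 1 ≤ i → pvGet2 (initFold m n k) i j = 0) := by
  intro k
  induction k with
  | zero =>
    intro _
    refine ⟨by simp [initFold], fun i' => rfl, by omega, ?_, ?_⟩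
    · intro j _; exact replicate_get0 m n 0 j
    · intro i j _; exact replicate_get0 m n i j
  | succ k ih =>
    intro hk
    obtain ⟨h1, h2, h3, h4, h5⟩ := ih (by omega)
    have hstep : initFold m n (k+1) = pvSet2 (initFold m n k) 0 k 1 := by
      unfold initFold
      rw [List.range_succ, List.foldl_append, List.foldl_cons, List.foldl_nil]
    rw [hstep]
    refine ⟨by rw [length_set2]; exact h1, fun i' => by rw [rowlen_set2]; exact h2 i', ?_, ?_, ?_⟩
    · intro j hj
      by_cases hjk : j = k
      · subst hjk
        apply get2_set2_self
        · rw [h1]; omega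
        · rw [h2 0, replicate_rowlen m n 0 (by omega)]; omega
      · rw [get2_set2_ne _ _ _ _ _ _ (Or.inr hjk)]
        exact h3 j (by omega)
    · intro j hj
      rw [get2_set2_ne _ _ _ _ _ _ (Or.inr (by omega))]
      exact h4 j (by omega)
    · intro i j hi
      rw [get2_set2_ne _ _ _ _ _ _ (Or.inl (by omega))]
      exact h5 i j hi

lemma aRow_spec (a0 b0 : List Char) (ip : Nat) (hip : ip < b0.length) (T : List (List Int))
    (hlen : T.length = b0.length+1)
    (hrow : ∀ i', ((T.getD i' []).length) = ((List.replicate (b0.length+1) (List.replicate (a0.length+1) (0:Int))).getD i' []).length)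
    (hprev : ∀ i' j, i' ≤ ip → j ≤ a0.length → pvGet2 T i' j = dp a0 b0 i' j)
    (hzero : ∀ i' j, ip < i' → pvGet2 T i' j = 0) :
    ∀ c, c ≤ a0.length →
      (aRow a0 b0 (ip+1) T c).length = b0.length+1 ∧
      (∀ i', ((aRow a0 b0 (ip+1) T c).getD i' []).length = ((List.replicate (b0.length+1) (List.replicate (a0.length+1) (0:Int))).getD i' []).length) ∧
      (∀ i' j, i' ≠ ip+1 → pvGet2 (aRow a0 b0 (ip+1) T c) i' j = pvGet2 T i' j) ∧
      (∀ j, j ≤ c → pvGet2 (aRow a0 b0 (ip+1) T c) (ip+1) j = dp a0 b0 (ip+1) j) ∧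
      (∀ j, c < j → pvGet2 (aRow a0 b0 (ip+1) T c) (ip+1) j = 0) := by
  intro c
  induction c with
  | zero =>
    intro _
    refine ⟨hlen, hrow, fun i' j _ => rfl, ?_, ?_⟩
    · intro j hj
      have hj0 : j = 0 := by omega
      subst hj0
      rw [dp_col0 a0 b0 (ip+1) (by omega)]
      exact hzero (ip+1) 0 (by omega)
    · intro j _
      exact hzero (ip+1) j (by omega)
  | succ c ih =>
    intro hc
    obtain ⟨g1, g2, g3, g4, g5⟩ := ih (by omega)
    have hstep : aRow a0 b0 (ip+1) T (c+1)
        = aBody (' '::a0) (' '::b0) (ip+1) (aRow a0 b0 (ip+1) T c) (c+1) := by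
      unfold aRow
      rw [List.range'_concat, List.foldl_append, List.foldl_cons, List.foldl_nil,
          show 1 + 1*c = c + 1 by omega]
    set S := aRow a0 b0 (ip+1) T c with hS
    have hS1 : ip + 1 < S.length := by rw [g1]; omega
    have hS2 : c + 1 < (S.getD (ip+1) []).length := by
      rw [g2 (ip+1), replicate_rowlen _ _ _ (by omega)]; omega
    have rA : pvGet2 S ip c = dp a0 b0 ip c := by
      rw [g3 ip c (by omega)]; exact hprev ip c (by omega) (by omega)
    have rB : pvGet2 S (ip+1) c = dp a0 b0 (ip+1) c := g4 c (by omega)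
    have rC : pvGet2 S ip (c-1) = dp a0 b0 ip (c-1) := by
      rw [g3 ip (c-1) (by omega)]; exact hprev ip (c-1) (by omega) (by omega)
    rw [hstep]
    refine ⟨?_, ?_, ?_, ?_, ?_⟩
    · unfold aBody; split_ifs <;> rw [length_set2] <;> exact g1
    · intro i'; unfold aBody; split_ifs <;> rw [rowlen_set2] <;> exact g2 i'
    · intro i' j hne
      unfold aBody
      split_ifs <;> rw [get2_set2_ne _ _ _ _ _ _ (Or.inl hne)] <;> exact g3 i' j hne
    · intro j hj
      by_cases hjc : j = c+1
      · subst hjc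
        unfold aBody
        rw [dp]
        have e2 : c + 1 - 2 = c - 1 := by omega
        simp only [Nat.add_sub_cancel, e2, List.getD_cons_succ]
        split_ifs with h1 h2 h3 h4
        · rw [get2_set2_self S _ _ _ hS1 hS2, rA, rB]
        · rw [get2_set2_self S _ _ _ hS1 hS2, rC, rB]
        · -- port's vv-branch holds but dp's does not: impossible
          exfalso
          obtain ⟨hne', hw, hv, hcpos, hvv⟩ := h2
          apply h3
          refine ⟨hw, hv, by omega, ?_⟩
          cases c with
          | zero => omega
          | succ cp => simpa using hvv
        · -- dp's vv-branch holds but port's does not: impossible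
          exfalso
          obtain ⟨hw, hv, hcpos, hvv⟩ := h4
          apply h2
          refine ⟨by rw [hw, hv]; decide, hw, hv, by omega, ?_⟩
          cases c with
          | zero => omega
          | succ cp => simpa using hvv
        · rw [get2_set2_self S _ _ _ hS1 hS2, rB]
      · unfold aBody
        split_ifs <;> rw [get2_set2_ne _ _ _ _ _ _ (Or.inr hjc)] <;> exact g4 j (by omega)
    · intro j hj
      unfold aBody
      split_ifs <;> rw [get2_set2_ne _ _ _ _ _ _ (Or.inr (by omega))] <;> exact g5 j (by omega)

lemma aRows_spec (a0 b0 : List Char) : ∀ k, k ≤ b0.length →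
    (aRows a0 b0 k).length = b0.length+1 ∧
    (∀ i', ((aRows a0 b0 k).getD i' []).length = ((List.replicate (b0.length+1) (List.replicate (a0.length+1) (0:Int))).getD i' []).length) ∧
    (∀ i j, i ≤ k → j ≤ a0.length → pvGet2 (aRows a0 b0 k) i j = dp a0 b0 i j) ∧
    (∀ i j, k < i → pvGet2 (aRows a0 b0 k) i j = 0) := by
  intro k
  induction k with
  | zero =>
    intro _
    obtain ⟨h1, h2, h3, h4, h5⟩ := initFold_spec b0.length a0.length (a0.length+1) (le_refl _)
    refine ⟨h1, h2, ?_, ?_⟩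
    · intro i j hi hj
      have hi0 : i = 0 := by omega
      subst hi0
      rw [dp_row0]
      exact h3 j (by omega)
    · intro i j hi
      exact h5 i j (by omega)
  | succ k ih =>
    intro hk
    obtain ⟨h1, h2, h3, h4⟩ := ih (by omega)
    have hstep : aRows a0 b0 (k+1) = aRow a0 b0 (k+1) (aRows a0 b0 k) a0.length := by
      unfold aRows
      rw [List.range'_concat, List.foldl_append, List.foldl_cons, List.foldl_nil,
          show 1 + 1*k = k + 1 by omega]
    obtain ⟨g1, g2, g3, g4, g5⟩ :=
      aRow_spec a0 b0 k (by omega) (aRows a0 b0 k) h1 h2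
        (fun i' j hi hj => h3 i' j hi hj) (fun i' j hi => h4 i' j hi)
        a0.length (le_refl _)
    rw [hstep]
    refine ⟨g1, g2, ?_, ?_⟩
    · intro i j hi hj
      by_cases hik : i = k+1
      · subst hik; exact g4 j hj
      · rw [g3 i j hik]; exact h3 i j (by omega) hj
    · intro i j hi
      rw [g3 i j (by omega)]
      exact h4 i j (by omega)

-- ================== B-side: the memoized stack loop computes dp ==================

-- every value stored in the memo is the dp value of its cell
def MemoOK (a b : List Char) (memo : PySem.Dict (Nat × Nat) Int) : Prop :=
  ∀ c v, memo.get? c = some v → v = dp a b c.1 c.2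

-- every expanded entry on the stack is an inner cell whose dependencies are
-- memoized or still pending above it
def StackOK (a b : List Char) (stack : List ((Nat × Nat) × Bool))
    (memo : PySem.Dict (Nat × Nat) Int) : Prop :=
  ∀ pre c post, stack = pre ++ (c, true) :: post →
    (1 ≤ c.1 ∧ 1 ≤ c.2) ∧
    ∀ d ∈ depsB a b c.1 c.2, (memo.get? d).isSome = true ∨ ∃ ph, (d, ph) ∈ pre

lemma get?_isSome_insert (memo : PySem.Dict (Nat × Nat) Int) (k c : Nat × Nat) (v : Int)
    (h : (memo.get? c).isSome = true) : ((memo.insert k v).get? c).isSome = true := by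
  by_cases hck : c = k
  · subst hck; simp [PySem.Dict.get?_insert_self]
  · rw [PySem.Dict.get?_insert_of_ne _ _ hck]; exact h

-- splitting a decomposition around a block of unexpanded entries
lemma split_after_false (L : List ((Nat × Nat) × Bool)) (hL : ∀ e ∈ L, e.2 = false) :
    ∀ (R pre post : List ((Nat × Nat) × Bool)) (c : Nat × Nat),
      L ++ R = pre ++ (c, true) :: post →
      ∃ pre', pre = L ++ pre' ∧ R = pre' ++ (c, true) :: post := by
  induction L with
  | nil => intro R pre post c h; exact ⟨pre, by simpa using h⟩
  | cons e L ih =>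
    intro R pre post c h
    cases pre with
    | nil =>
      exfalso
      simp only [List.nil_append, List.cons_append, List.cons.injEq] at h
      have := hL e (by simp)
      rw [h.1] at this
      simp at this
    | cons p pre₁ =>
      simp only [List.cons_append, List.cons.injEq] at h
      obtain ⟨rfl, h2⟩ := h
      obtain ⟨pre', rfl, hR⟩ := ih (fun e he => hL e (by simp [he])) R pre₁ post c h2
      exact ⟨pre', by simp, hR⟩

lemma loopB_inv (a b : List Char) : ∀ (N : Nat) (stack : List ((Nat × Nat) × Bool))
    (memo : PySem.Dict (Nat × Nat) Int), phiStack stack ≤ N →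
    MemoOK a b memo → StackOK a b stack memo →
    MemoOK a b (loopB a b stack memo) ∧
    (∀ c, (memo.get? c).isSome = true → ((loopB a b stack memo).get? c).isSome = true) ∧
    (∀ c ph, (c, ph) ∈ stack → ((loopB a b stack memo).get? c).isSome = true) := by
  intro N
  induction N with
  | zero =>
    intro stack memo hphi hM hS
    cases stack with
    | nil => exact ⟨by rw [loopB]; exact hM, fun c h => by rw [loopB]; exact h, by simp⟩
    | cons e rest =>
      exfalso
      have : 1 ≤ wEntry e := by
        unfold wEntry; split <;> [omega; exact Nat.one_le_pow _ _ (by norm_num)]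
      simp only [phiStack, List.map_cons, List.sum_cons] at hphi
      omega
  | succ N ih =>
    intro stack memo hphi hM hS
    cases stack with
    | nil => exact ⟨by rw [loopB]; exact hM, fun c h => by rw [loopB]; exact h, by simp⟩
    | cons e rest =>
      obtain ⟨⟨i, j⟩, ph⟩ := e
      have hwe : 1 ≤ wEntry ((i, j), ph) := by
        unfold wEntry; split <;> [omega; exact Nat.one_le_pow _ _ (by norm_num)]
      have hphi' : phiStack rest ≤ N := by
        simp only [phiStack, List.map_cons, List.sum_cons] at hphi
        simp only [phiStack]; omega
      by_cases hph : ph = true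
      · -- expanded entry: memoize from dependencies
        subst hph
        obtain ⟨⟨hi1, hj1⟩, hdeps⟩ := hS [] (i, j) rest rfl
        set v : Int := ((depsB a b i j).map (fun d => memo.getD d 0)).sum with hv
        have hvdp : v = dp a b i j := by
          rw [hv, dp_succ a b i j hi1 hj1]
          congr 1
          apply List.map_congr_left
          intro d hd
          rcases hdeps d hd with hsome | ⟨ph', hmem⟩
          · obtain ⟨vd, hvd⟩ := Option.isSome_iff_exists.mp hsome
            rw [PySem.Dict.getD_eq_get?_getD, hvd]
            exact hM d vd hvd
          · simp at hmem
        have hstep : loopB a b (((i, j), true) :: rest) memo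
            = loopB a b rest (memo.insert (i, j) v) := by
          rw [loopB]
        have hM' : MemoOK a b (memo.insert (i, j) v) := by
          intro c w hw
          by_cases hc : c = (i, j)
          · subst hc
            rw [PySem.Dict.get?_insert_self] at hw
            cases hw; exact hvdp
          · rw [PySem.Dict.get?_insert_of_ne _ _ hc] at hw
            exact hM c w hw
        have hS' : StackOK a b rest (memo.insert (i, j) v) := by
          intro pre c post hdec
          obtain ⟨hb, hd⟩ := hS (((i, j), true) :: pre) c post (by rw [hdec]; rfl)
          refine ⟨hb, fun d hdm => ?_⟩
          rcases hd d hdm with hsome | ⟨ph', hmem⟩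
          · exact Or.inl (get?_isSome_insert _ _ _ _ hsome)
          · rcases List.mem_cons.mp hmem with hh | ht
            · have hd' : d = (i, j) := congrArg Prod.fst hh
              subst hd'
              exact Or.inl (by simp [PySem.Dict.get?_insert_self])
            · exact Or.inr ⟨ph', ht⟩
        obtain ⟨r1, r2, r3⟩ := ih rest (memo.insert (i, j) v) hphi' hM' hS'
        refine ⟨by rw [hstep]; exact r1, fun c h => by
            rw [hstep]; exact r2 c (get?_isSome_insert _ _ _ _ h), ?_⟩
        intro c ph' hmem
        rw [hstep]
        rcases List.mem_cons.mp hmem with hh | ht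
        · have hc : c = (i, j) := congrArg Prod.fst hh
          rw [hc]
          exact r2 (i, j) (by simp [PySem.Dict.get?_insert_self])
        · exact r3 c ph' ht
      · -- unexpanded entry
        have hph' : ph = false := by simpa using hph
        subst hph'
        by_cases hmemo : (memo.get? (i, j)).isSome = true
        · -- cache hit: skip
          have hstep : loopB a b (((i, j), false) :: rest) memo = loopB a b rest memo := by
            rw [loopB]; simp [hmemo]
          have hS' : StackOK a b rest memo := by
            intro pre c post hdec
            obtain ⟨hb, hd⟩ := hS (((i, j), false) :: pre) c post (by rw [hdec]; rfl)
            refine ⟨hb, fun d hdm => ?_⟩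
            rcases hd d hdm with hsome | ⟨ph', hmem⟩
            · exact Or.inl hsome
            · rcases List.mem_cons.mp hmem with hh | ht
              · have : d = (i, j) := congrArg Prod.fst hh
                exact Or.inl (this ▸ hmemo)
              · exact Or.inr ⟨ph', ht⟩
          obtain ⟨r1, r2, r3⟩ := ih rest memo hphi' hM hS'
          refine ⟨by rw [hstep]; exact r1, fun c h => by rw [hstep]; exact r2 c h, ?_⟩
          intro c ph' hmem
          rw [hstep]
          rcases List.mem_cons.mp hmem with hh | ht
          · have hc : c = (i, j) := congrArg Prod.fst hh
            exact r2 c (hc ▸ hmemo)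
          · exact r3 c ph' ht
        · by_cases hi0 : i = 0
          · -- base row: memoize 1
            subst hi0
            have hstep : loopB a b (((0, j), false) :: rest) memo
                = loopB a b rest (memo.insert (0, j) 1) := by
              rw [loopB]; simp [hmemo]
            have hM' : MemoOK a b (memo.insert (0, j) 1) := by
              intro c w hw
              by_cases hc : c = (0, j)
              · subst hc
                rw [PySem.Dict.get?_insert_self] at hw
                cases hw
                exact (dp_row0 a b j).symm
              · rw [PySem.Dict.get?_insert_of_ne _ _ hc] at hw
                exact hM c w hw
            have hS' : StackOK a b rest (memo.insert (0, j) 1) := by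
              intro pre c post hdec
              obtain ⟨hb, hd⟩ := hS (((0, j), false) :: pre) c post (by rw [hdec]; rfl)
              refine ⟨hb, fun d hdm => ?_⟩
              rcases hd d hdm with hsome | ⟨ph', hmem⟩
              · exact Or.inl (get?_isSome_insert _ _ _ _ hsome)
              · rcases List.mem_cons.mp hmem with hh | ht
                · have : d = (0, j) := congrArg Prod.fst hh
                  exact Or.inl (this ▸ (by simp [PySem.Dict.get?_insert_self]))
                · exact Or.inr ⟨ph', ht⟩
            obtain ⟨r1, r2, r3⟩ := ih rest (memo.insert (0, j) 1) hphi' hM' hS'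
            refine ⟨by rw [hstep]; exact r1, fun c h => by
                rw [hstep]; exact r2 c (get?_isSome_insert _ _ _ _ h), ?_⟩
            intro c ph' hmem
            rw [hstep]
            rcases List.mem_cons.mp hmem with hh | ht
            · have hc : c = (0, j) := congrArg Prod.fst hh
              rw [hc]
              exact r2 (0, j) (by simp [PySem.Dict.get?_insert_self])
            · exact r3 c ph' ht
          · by_cases hj0 : j = 0
            · -- base column: memoize 0
              subst hj0
              have hstep : loopB a b (((i, 0), false) :: rest) memo
                  = loopB a b rest (memo.insert (i, 0) 0) := by
                rw [loopB]; simp [hmemo, hi0]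
              have hM' : MemoOK a b (memo.insert (i, 0) 0) := by
                intro c w hw
                by_cases hc : c = (i, 0)
                · subst hc
                  rw [PySem.Dict.get?_insert_self] at hw
                  cases hw
                  exact (dp_col0 a b i (by omega)).symm
                · rw [PySem.Dict.get?_insert_of_ne _ _ hc] at hw
                  exact hM c w hw
              have hS' : StackOK a b rest (memo.insert (i, 0) 0) := by
                intro pre c post hdec
                obtain ⟨hb, hd⟩ := hS (((i, 0), false) :: pre) c post (by rw [hdec]; rfl)
                refine ⟨hb, fun d hdm => ?_⟩
                rcases hd d hdm with hsome | ⟨ph', hmem⟩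
                · exact Or.inl (get?_isSome_insert _ _ _ _ hsome)
                · rcases List.mem_cons.mp hmem with hh | ht
                  · have : d = (i, 0) := congrArg Prod.fst hh
                    exact Or.inl (this ▸ (by simp [PySem.Dict.get?_insert_self]))
                  · exact Or.inr ⟨ph', ht⟩
              obtain ⟨r1, r2, r3⟩ := ih rest (memo.insert (i, 0) 0) hphi' hM' hS'
              refine ⟨by rw [hstep]; exact r1, fun c h => by
                  rw [hstep]; exact r2 c (get?_isSome_insert _ _ _ _ h), ?_⟩
              intro c ph' hmem
              rw [hstep]
              rcases List.mem_cons.mp hmem with hh | ht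
              · have hc : c = (i, 0) := congrArg Prod.fst hh
                rw [hc]
                exact r2 (i, 0) (by simp [PySem.Dict.get?_insert_self])
              · exact r3 c ph' ht
            · -- expand: push pending dependencies above the expanded entry
              set pendPart : List ((Nat × Nat) × Bool) :=
                ((depsB a b i j).filter (fun d => (memo.get? d).isNone)).reverse.map
                  (fun d => (d, false)) with hpend
              have hstep : loopB a b (((i, j), false) :: rest) memo
                  = loopB a b (pendPart ++ ((i, j), true) :: rest) memo := by
                rw [loopB]; simp [hmemo, hi0, hj0, hpend]
              have hphinew : phiStack (pendPart ++ ((i, j), true) :: rest) ≤ N := by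
                have := phiStack_expand_lt ((depsB a b i j).filter (fun d => (memo.get? d).isNone))
                  i j rest hj0
                  (le_trans (List.length_filter_le _ _) (depsB_length_le a b i j))
                  (fun d hd => depsB_snd_lt a b i j hj0 d (List.mem_of_mem_filter hd))
                simp only [phiStack, List.map_cons, List.sum_cons] at this hphi ⊢
                simp only [hpend]
                omega
              have hpfalse : ∀ e ∈ pendPart, e.2 = false := by
                intro e he
                simp only [hpend, List.mem_map] at he
                obtain ⟨d, _, rfl⟩ := he
                rfl
              have hS' : StackOK a b (pendPart ++ ((i, j), true) :: rest) memo := by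
                intro pre c post hdec
                obtain ⟨pre', rfl, hR⟩ := split_after_false pendPart hpfalse _ pre post c hdec
                cases pre' with
                | nil =>
                  simp only [List.nil_append, List.cons.injEq] at hR
                  obtain ⟨hc, rfl⟩ := hR
                  have hc' : c = (i, j) := ((Prod.mk.inj hc).1).symm
                  subst hc'
                  refine ⟨⟨by omega, by omega⟩, fun d hd => ?_⟩
                  by_cases hds : (memo.get? d).isSome = true
                  · exact Or.inl hds
                  · refine Or.inr ⟨false, ?_⟩
                    simp only [hpend, List.mem_append, List.mem_map, List.mem_reverse,
                      List.mem_filter]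
                    exact Or.inl ⟨d, ⟨hd, by simpa [Option.isNone_iff_eq_none,
                      Option.isSome_iff_ne_none] using hds⟩, rfl⟩
                | cons p pre₂ =>
                  simp only [List.cons_append, List.cons.injEq] at hR
                  obtain ⟨rfl, hR2⟩ := hR
                  obtain ⟨hb, hd⟩ := hS (((i, j), false) :: pre₂) c post (by rw [hR2]; rfl)
                  refine ⟨hb, fun d hdm => ?_⟩
                  rcases hd d hdm with hsome | ⟨ph', hmem⟩
                  · exact Or.inl hsome
                  · rcases List.mem_cons.mp hmem with hh | ht
                    · have : d = (i, j) := congrArg Prod.fst hh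
                      subst this
                      exact Or.inr ⟨true, by simp⟩
                    · exact Or.inr ⟨ph', by simp [ht]⟩
              obtain ⟨r1, r2, r3⟩ := ih (pendPart ++ ((i, j), true) :: rest) memo hphinew hM hS'
              refine ⟨by rw [hstep]; exact r1, fun c h => by rw [hstep]; exact r2 c h, ?_⟩
              intro c ph' hmem
              rw [hstep]
              rcases List.mem_cons.mp hmem with hh | ht
              · have hc : c = (i, j) := congrArg Prod.fst hh
                rw [hc]
                exact r3 (i, j) true (by simp)
              · exact r3 c ph' (by simp [ht])

lemma solve_alt_eq_dp (A B : String) :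
    solve_alt A B = dp A.toList B.toList B.toList.length A.toList.length := by
  unfold solve_alt
  set a := A.toList
  set b := B.toList
  have hM : MemoOK a b PySem.Dict.empty := by
    intro c v hv
    rw [PySem.Dict.get?_empty] at hv
    cases hv
  have hS : StackOK a b [((b.length, a.length), false)] PySem.Dict.empty := by
    intro pre c post hdec
    exfalso
    cases pre <;> simp_all
  obtain ⟨r1, r2, r3⟩ := loopB_inv a b (phiStack [((b.length, a.length), false)])
    [((b.length, a.length), false)] PySem.Dict.empty (le_refl _) hM hS
  have hsome := r3 (b.length, a.length) false (by simp)
  obtain ⟨v, hv⟩ := Option.isSome_iff_exists.mp hsome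
  rw [PySem.Dict.getD_eq_get?_getD, hv]
  exact r1 (b.length, a.length) v hv

-- ===== VERDICT (by name: the statement is the Claim_ definition above) =====
theorem solve_spec : Claim_equal_solve := by
  intro A B _
  unfold Spec_solve
  rw [solve_eq, solve_alt_eq_dp]
  obtain ⟨h1, h2, h3, h4⟩ := aRows_spec A.toList B.toList B.toList.length (le_refl _)
  exact h3 B.toList.length A.toList.length (le_refl _) (le_refl _)
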